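-- pv_equiv track=rewrite | github.com/karoosoftware/margana-backend | python/margana_gen/word_graph.py | longest_constructible_words
-- ===== SOURCE A (Python) =====
-- from collections import defaultdict, Counter, deque
--
-- def longest_constructible_words(pool_letters, dictionary_words):
--     """Return only the longest words that can be formed from the multiset of letters."""
--     pool = Counter(pool_letters)
--     best = []
--     best_len = 0
--     for w in dictionary_words:
--         c = Counter(w)
--         if c - pool:
--             continue  # needs letters not available
--         lw = len(w)
--         if lw > best_len:
--             best = [w]
--             best_len = lw
--         elif lw == best_len:
--             best.append(w)
--     return sorted(best)
-- ===== SOURCE B (Python) =====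
-- from collections import Counter
--
-- def longest_constructible_words(pool_letters, dictionary_words):
--     """Return only the longest words that can be formed from the multiset of letters."""
--     pool = Counter(pool_letters)
--     constructible = [w for w in dictionary_words
--                      if all(w.count(ch) <= pool.get(ch, 0) for ch in set(w))]
--     if not constructible:
--         return []
--     max_len = max(map(len, constructible))
--     return sorted(w for w in constructible if len(w) == max_len)
-- ===== Notes on version B (the rewrite author's own statement) =====
-- stated objective: simpler
-- what changed: Replaces A's fused single pass with online best-list/best-length tracking and per-word Counter subtraction by three plain passes: collect constructible words via a direct per-distinct-character count comparison against one precomputed pool Counter, take the max length, filter to it.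
import Mathlib
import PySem

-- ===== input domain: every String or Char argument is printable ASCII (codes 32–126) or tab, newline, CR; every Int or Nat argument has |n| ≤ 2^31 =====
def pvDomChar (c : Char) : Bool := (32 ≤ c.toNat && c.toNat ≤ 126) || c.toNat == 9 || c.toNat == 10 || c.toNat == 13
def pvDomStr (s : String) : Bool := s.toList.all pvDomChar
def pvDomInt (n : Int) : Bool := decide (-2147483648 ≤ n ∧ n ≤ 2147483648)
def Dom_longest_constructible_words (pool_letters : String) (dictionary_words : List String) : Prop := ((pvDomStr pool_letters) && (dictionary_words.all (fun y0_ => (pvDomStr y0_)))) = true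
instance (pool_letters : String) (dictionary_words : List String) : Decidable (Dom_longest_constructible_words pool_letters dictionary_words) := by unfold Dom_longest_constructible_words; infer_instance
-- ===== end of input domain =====

-- B replaces A's fused single pass (online best-list/best-length tracking with Counter
-- subtraction) by three plain passes: collect constructible words via a direct
-- per-character count comparison, take the max length, filter to it; objective: simpler.


-- ===== PORT A =====
-- Counter.__sub__ keeps the keys of the left counter whose difference is positive
-- (its second loop, over negative counts of the right operand, never fires here since
-- all Counter-of-string counts are positive); Python's `if c - pool:` is the
-- nonemptiness of that result.
def pvCounterSubPos (c pool : PySem.Dict Char Int) : List (Char × Int) :=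
  c.items.filterMap (fun p =>
    if p.2 - pool.getD p.1 0 > 0 then some (p.1, p.2 - pool.getD p.1 0) else none)

-- one iteration of A's `for w in dictionary_words` loop over the state (best, best_len)
def pvStepA (pool : PySem.Dict Char Int) (st : List String × Nat) (w : String) :
    List String × Nat :=
  let c := PySem.Dict.counter w.toList
  if pvCounterSubPos c pool ≠ [] then st
  else
    let lw := w.toList.length
    if lw > st.2 then ([w], lw)
    else if lw = st.2 then (st.1 ++ [w], st.2)
    else st

def longest_constructible_words (pool_letters : String) (dictionary_words : List String) : List String :=
  let pool := PySem.Dict.counter pool_letters.toList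
  let st := dictionary_words.foldl (pvStepA pool) ([], 0)
  PySem.List.sorted st.1 (fun x => x) false

-- ===== PORT B =====
-- Source B's `all(w.count(ch) <= pool.get(ch, 0) for ch in set(w))`;
-- str.count with a single-character needle is exactly the character count.
def pvCanBuild (pool : PySem.Dict Char Int) (w : String) : Bool :=
  (PySem.Set.ofList w.toList).all (fun ch => (w.toList.count ch : Int) ≤ (pool.get? ch).getD 0)

def longest_constructible_words_alt (pool_letters : String) (dictionary_words : List String) : List String :=
  let pool := PySem.Dict.counter pool_letters.toList
  let constructible := dictionary_words.filter (pvCanBuild pool)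
  if constructible = [] then []
  else
    let maxLen := PySem.List.maxD (constructible.map (fun w => w.toList.length)) (fun x => x) 0
    PySem.List.sorted (constructible.filter (fun w => w.toList.length = maxLen)) (fun x => x) false

-- ===== PRECONDITION & SPEC =====
def Spec_longest_constructible_words (pool_letters : String) (dictionary_words : List String) (out : List String) : Prop := out = longest_constructible_words_alt pool_letters dictionary_words
instance (pool_letters : String) (dictionary_words : List String) (out : List String) : Decidable (Spec_longest_constructible_words pool_letters dictionary_words out) := by unfold Spec_longest_constructible_words; infer_instance

-- ===== CLAIM (what is proved, stated in full; the proofs are below) =====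
def Claim_equal_longest_constructible_words : Prop := ∀ (pool_letters : String) (dictionary_words : List String), Dom_longest_constructible_words pool_letters dictionary_words → Spec_longest_constructible_words pool_letters dictionary_words (longest_constructible_words pool_letters dictionary_words)

-- ===== LEMMAS AND PROOFS =====

-- A's Counter-subtraction emptiness test agrees with B's per-character count comparison
lemma pv_test_iff (pool : List Char) (w : String) :
    pvCounterSubPos (PySem.Dict.counter w.toList) (PySem.Dict.counter pool) = [] ↔
      pvCanBuild (PySem.Dict.counter pool) w = true := by
  simp [pvCounterSubPos, pvCanBuild, PySem.Dict.items_counter, PySem.Dict.getD_counter,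
    ← PySem.Dict.getD_eq_get?_getD, List.filterMap_eq_nil_iff, List.all_eq_true]

-- the maximum word length of a list (0 when empty), as a running max
def pvM (cs : List String) : Nat := (cs.map (fun w => w.toList.length)).foldl max 0

lemma pvM_append (cs : List String) (w : String) :
    pvM (cs ++ [w]) = max (pvM cs) w.toList.length := by
  simp [pvM, List.foldl_append]

lemma pv_len_le_M (cs : List String) (x : String) (hx : x ∈ cs) : x.toList.length ≤ pvM cs :=
  (PySem.List.le_foldl_max _ 0).2 _ (List.mem_map_of_mem hx)

-- loop invariant of A's fold: the state is always
-- (constructible-so-far filtered to the max length, that max length)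
lemma pv_foldA_inv (pool : List Char) (l : List String) (cs : List String) :
    l.foldl (pvStepA (PySem.Dict.counter pool))
      (cs.filter (fun w => w.toList.length = pvM cs), pvM cs)
    = ((cs ++ l.filter (pvCanBuild (PySem.Dict.counter pool))).filter
         (fun w => w.toList.length = pvM (cs ++ l.filter (pvCanBuild (PySem.Dict.counter pool)))),
       pvM (cs ++ l.filter (pvCanBuild (PySem.Dict.counter pool)))) := by
  induction l generalizing cs with
  | nil => simp
  | cons w l ih =>
    by_cases hok : pvCanBuild (PySem.Dict.counter pool) w = true
    · have hsub : pvCounterSubPos (PySem.Dict.counter w.toList) (PySem.Dict.counter pool) = [] :=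
        (pv_test_iff pool w).mpr hok
      have hstep : pvStepA (PySem.Dict.counter pool)
          (cs.filter (fun w => w.toList.length = pvM cs), pvM cs) w
          = ((cs ++ [w]).filter (fun x => x.toList.length = pvM (cs ++ [w])), pvM (cs ++ [w])) := by
        simp only [pvStepA, hsub, ne_eq, not_true_eq_false, if_false]
        rcases lt_trichotomy (pvM cs) w.toList.length with hlt | heq | hgt
        · have hM : pvM (cs ++ [w]) = w.toList.length := by rw [pvM_append]; omega
          have hfil : cs.filter (fun x => x.toList.length = pvM (cs ++ [w])) = [] := by
            rw [List.filter_eq_nil_iff]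
            intro x hx
            have := pv_len_le_M cs x hx
            simp only [hM, decide_eq_true_eq]
            omega
          simp only [if_pos hlt]
          rw [List.filter_append, hfil, hM]
          simp
        · have hM : pvM (cs ++ [w]) = pvM cs := by rw [pvM_append]; omega
          simp only [hM]
          rw [List.filter_append]
          simp only [if_neg (by omega : ¬ w.toList.length > pvM cs), if_pos heq.symm]
          simp [heq]
        · have hM : pvM (cs ++ [w]) = pvM cs := by rw [pvM_append]; omega
          simp only [hM]
          rw [List.filter_append]
          simp only [if_neg (by omega : ¬ w.toList.length > pvM cs),
            if_neg (by omega : ¬ w.toList.length = pvM cs)]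
          have hne : ¬ (w.toList.length = pvM cs) := by omega
          simp only [List.filter_cons, List.filter_nil, decide_eq_true_eq]
          rw [if_neg hne, List.append_nil]
      rw [List.foldl_cons, hstep, ih (cs ++ [w])]
      simp [List.filter_cons, hok, List.append_assoc]
    · have hsub : pvCounterSubPos (PySem.Dict.counter w.toList) (PySem.Dict.counter pool) ≠ [] := by
        intro hc; exact hok ((pv_test_iff pool w).mp hc)
      have hstep : pvStepA (PySem.Dict.counter pool)
          (cs.filter (fun w => w.toList.length = pvM cs), pvM cs) w
          = (cs.filter (fun w => w.toList.length = pvM cs), pvM cs) := by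
        simp only [pvStepA]
        rw [if_pos hsub]
      rw [List.foldl_cons, hstep, ih cs]
      simp [hok]

-- max(nonempty list of Nat) = its running max from 0
lemma pv_max?_cons (t : List Nat) (a : Nat) :
    PySem.List.max? (a :: t) (fun y => y) = some (t.foldl max a) := by
  induction t generalizing a with
  | nil => rfl
  | cons x t ih =>
    have h : PySem.List.max? (a :: x :: t) (fun y => y)
        = PySem.List.max? (max a x :: t) (fun y => y) := by
      simp only [PySem.List.max?, List.foldl_cons]
      congr 1
      split <;> simp <;> omega
    rw [h, ih]
    simp

lemma pv_maxD_eq (ls : List Nat) (h : ls ≠ []) :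
    PySem.List.maxD ls (fun x => x) 0 = ls.foldl max 0 := by
  cases ls with
  | nil => exact absurd rfl h
  | cons x t =>
    simp only [PySem.List.maxD, pv_max?_cons, Option.getD_some, List.foldl_cons]
    simp

-- ===== VERDICT (by name: the statement is the Claim_ definition above) =====
theorem longest_constructible_words_spec : Claim_equal_longest_constructible_words := by
  intro p d _
  unfold Spec_longest_constructible_words
  have hinv := pv_foldA_inv p.toList d []
  simp only [List.nil_append, List.filter_nil] at hinv
  have hbase : pvM ([] : List String) = 0 := rfl
  rw [hbase] at hinv
  simp only [longest_constructible_words, longest_constructible_words_alt, hinv]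
  by_cases hC : d.filter (pvCanBuild (PySem.Dict.counter p.toList)) = []
  · simp [hC]
    rfl
  · rw [if_neg hC]
    have hmap : (d.filter (pvCanBuild (PySem.Dict.counter p.toList))).map (fun w => w.toList.length) ≠ [] := by
      simpa using hC
    rw [pv_maxD_eq _ hmap]
    rfl
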